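-- pv_equiv track=rewrite | github.com/ianbel263/geekbrains_python | lesson_3/task_5.py | remove_not_int
-- ===== SOURCE A (Python) =====
-- def remove_not_int(data):
--     """Удаляет все элементы списка, которые нельзя привести к int"""
--     data_list = data.split()
--     is_not_int = False
--
--     for i, el in enumerate(data_list):
--         try:
--             data_list[i] = int(el)
--         except ValueError:
--             is_not_int = True
--
--     if is_not_int:
--         numbers = [datum for datum in data_list if type(datum) is int]
--     else:
--         numbers = data_list
--
--     return numbers
-- ===== SOURCE B (Python) =====
-- def remove_not_int(data):
--     """Удаляет все элементы списка, которые нельзя привести к int"""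
--     numbers = []
--     for el in data.split():
--         try:
--             numbers.append(int(el))
--         except ValueError:
--             pass
--     return numbers
-- ===== Notes on version B (the rewrite author's own statement) =====
-- stated objective: simpler
-- what changed: Single accumulate-while-parsing pass that appends int(el) on success, replacing A's in-place list mutation, is_not_int flag and conditional second filtering comprehension.
import Mathlib
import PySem

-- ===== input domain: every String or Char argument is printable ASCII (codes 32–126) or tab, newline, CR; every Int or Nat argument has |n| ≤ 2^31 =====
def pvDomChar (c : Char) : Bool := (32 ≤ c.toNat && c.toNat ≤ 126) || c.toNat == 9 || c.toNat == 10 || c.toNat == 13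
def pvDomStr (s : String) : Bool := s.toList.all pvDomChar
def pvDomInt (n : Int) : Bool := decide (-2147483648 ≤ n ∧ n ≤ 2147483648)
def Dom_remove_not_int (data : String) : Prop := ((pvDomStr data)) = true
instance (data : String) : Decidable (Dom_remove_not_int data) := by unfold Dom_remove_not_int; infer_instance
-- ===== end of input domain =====

-- ===== PORT A =====
-- B is proved equal to A on the RETURN value; A's local list mutation is internal only.
-- A's loop body: data_list[i] becomes int(el) on success, stays the string (and sets the flag) on ValueError
def pvConvStep (acc : List (Int ⊕ String) × Bool) (el : String) : List (Int ⊕ String) × Bool :=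
  match PySem.Int.ofStr? el with
  | some n => (acc.1 ++ [Sum.inl n], acc.2)
  | none   => (acc.1 ++ [Sum.inr el], true)

def remove_not_int (data : String) : List Int :=
  let data_list0 := PySem.Str.split₀ data
  let st := data_list0.foldl pvConvStep ([], false)
  if st.2 then
    st.1.filterMap (fun d => match d with | Sum.inl n => some n | Sum.inr _ => none)
  else
    -- is_not_int is false: every element was converted, 'numbers = data_list' reads them back as ints
    st.1.map (fun d => match d with | Sum.inl n => n | Sum.inr _ => 0)

-- ===== PORT B =====
def remove_not_int_alt (data : String) : List Int :=
  (PySem.Str.split₀ data).foldl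
    (fun numbers el =>
      match PySem.Int.ofStr? el with
      | some n => numbers ++ [n]
      | none   => numbers) []

-- ===== PRECONDITION & SPEC =====
def Spec_remove_not_int (data : String) (out : List Int) : Prop := out = remove_not_int_alt data
instance (data : String) (out : List Int) : Decidable (Spec_remove_not_int data out) := by unfold Spec_remove_not_int; infer_instance

-- ===== CLAIM (what is proved, stated in full; the proofs are below) =====
def Claim_equal_remove_not_int : Prop := ∀ (data : String), Dom_remove_not_int data → Spec_remove_not_int data (remove_not_int data)

-- ===== LEMMAS AND PROOFS =====

theorem pvFoldB_eq (ws : List String) (acc : List Int) :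
    ws.foldl (fun numbers el => match PySem.Int.ofStr? el with
      | some n => numbers ++ [n] | none => numbers) acc
    = acc ++ ws.filterMap PySem.Int.ofStr? := by
  induction ws generalizing acc with
  | nil => simp
  | cons w ws ih =>
    simp only [List.foldl, List.filterMap]
    cases h : PySem.Int.ofStr? w <;> simp [ih]

theorem pvFoldA_eq (ws : List String) (acc : List (Int ⊕ String)) (flag : Bool) :
    ws.foldl pvConvStep (acc, flag)
    = (acc ++ ws.map (fun el => match PySem.Int.ofStr? el with
        | some n => Sum.inl n | none => Sum.inr el),
       flag || ws.any (fun el => (PySem.Int.ofStr? el).isNone)) := by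
  induction ws generalizing acc flag with
  | nil => simp
  | cons w ws ih =>
    simp only [List.foldl, List.map, List.any_cons]
    cases h : PySem.Int.ofStr? w <;>
      simp [pvConvStep, h, ih, ]

theorem pvFilterMap_conv (ws : List String) :
    (ws.map (fun el => match PySem.Int.ofStr? el with
        | some n => Sum.inl n | none => Sum.inr el)).filterMap
      (fun d => match d with | Sum.inl n => some n | Sum.inr _ => none)
    = ws.filterMap PySem.Int.ofStr? := by
  induction ws with
  | nil => rfl
  | cons w ws ih =>
    cases h : PySem.Int.ofStr? w <;> simp [List.filterMap, h, ih]

theorem pvMap_conv (ws : List String)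
    (hall : ws.any (fun el => (PySem.Int.ofStr? el).isNone) = false) :
    (ws.map (fun el => match PySem.Int.ofStr? el with
        | some n => Sum.inl n | none => Sum.inr el)).map
      (fun d => match d with | Sum.inl n => n | Sum.inr _ => 0)
    = ws.filterMap PySem.Int.ofStr? := by
  induction ws with
  | nil => rfl
  | cons w ws ih =>
    simp only [List.any_cons, Bool.or_eq_false_iff] at hall
    cases h : PySem.Int.ofStr? w
    · simp [h] at hall
    · simp [List.filterMap, h, ih hall.2]

-- ===== VERDICT (by name: the statement is the Claim_ definition above) =====
theorem remove_not_int_spec : Claim_equal_remove_not_int := by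
  intro data _
  show remove_not_int data = remove_not_int_alt data
  simp only [remove_not_int, remove_not_int_alt]
  rw [pvFoldB_eq, pvFoldA_eq]
  simp only [List.nil_append, Bool.false_or]
  by_cases h : (PySem.Str.split₀ data).any (fun el => (PySem.Int.ofStr? el).isNone) = true
  · rw [if_pos h]
    exact pvFilterMap_conv _
  · rw [if_neg h]
    exact pvMap_conv _ (Bool.not_eq_true _ ▸ h)
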